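-- pv_equiv track=rewrite | github.com/InitialS-AI/Stateful-AI-Analysis | sequential_mining.py | find_similar_pattern
-- ===== SOURCE A (Python) =====
-- def find_similar_pattern(target_trace, querry_trace):
--     """
--     find similar pattern in a trace
--     :param target_trace: [1, 2, 3, 4, 5, 6, ...]
--     :param querry_trace: [2, 3, 4]
--     :return:
--     """
--     # TODO
--     result = []
--     querry_trace_len = len(querry_trace)
--     this_trace_len = len(target_trace)
--     if this_trace_len < querry_trace_len:
--         return False
--     if querry_trace[0] in target_trace:
--         i = target_trace.index(querry_trace[0])
--     else:
--         return False
--     while i < (this_trace_len - querry_trace_len + 1):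
--         while i < (this_trace_len - querry_trace_len + 1) and target_trace[i] != querry_trace[0]:
--             i += 1
--         j = 0
--         k = 0
--         id = []
--         while (i + j) < this_trace_len:
--             if target_trace[i + j] == querry_trace[k]:
--                 id.append(i + j)
--                 k += 1
--             j += 1
--             if k == querry_trace_len:
--                 return True
--         i += 1
--     return False
-- ===== SOURCE B (Python) =====
-- def find_similar_pattern(target_trace, querry_trace):
--     it = iter(target_trace)
--     return all(x in it for x in querry_trace)
-- ===== Notes on version B (the rewrite author's own statement) =====
-- stated objective: faster
-- what changed: A rescans with nested loops from every anchor position of querry_trace[0]; B does one greedy left-to-right pass consuming target_trace with an iterator (subsequence test), eliminating all restarts.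
import Mathlib
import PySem

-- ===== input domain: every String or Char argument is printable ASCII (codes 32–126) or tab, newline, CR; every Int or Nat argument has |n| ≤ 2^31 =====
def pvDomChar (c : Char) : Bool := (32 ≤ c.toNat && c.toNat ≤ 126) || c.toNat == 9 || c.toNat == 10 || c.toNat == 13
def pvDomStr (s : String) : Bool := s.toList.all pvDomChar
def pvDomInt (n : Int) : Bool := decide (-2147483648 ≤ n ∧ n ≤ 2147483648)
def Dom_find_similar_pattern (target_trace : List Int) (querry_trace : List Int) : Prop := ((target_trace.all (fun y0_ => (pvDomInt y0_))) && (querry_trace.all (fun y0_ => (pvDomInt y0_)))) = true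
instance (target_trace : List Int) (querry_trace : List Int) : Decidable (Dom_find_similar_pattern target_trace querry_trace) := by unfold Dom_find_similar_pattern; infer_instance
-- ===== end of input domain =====

-- B replaces A's restart-at-every-anchor nested scan (O(n*m)) by a single greedy
-- left-to-right pass (O(n)); same return value on every non-empty query.

-- ===== PORT A =====
-- All of Python's loop counters (i, j, k) start ≥ 0 and only ever grow, and every
-- target_trace[i+j] / querry_trace[k] access A performs is guarded in range, so they are
-- ported as Nat and the indexing as List.getD (exact where Python's xs[idx] returns).

-- inner skip loop: while i < bound and target_trace[i] != querry_trace[0]: i += 1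
def pvSkip (t : List Int) (q0 : Int) (bound : Nat) (i : Nat) : Nat :=
  if h : i < bound ∧ t.getD i 0 ≠ q0 then pvSkip t q0 bound (i + 1) else i
  termination_by bound - i
  decreasing_by omega

-- innermost loop: while (i + j) < n: compare, append to id, j += 1, check k == m
def pvInner (t q : List Int) (n m i j k : Nat) (id : List Nat) : Bool :=
  if h : i + j < n then
    if t.getD (i + j) 0 = q.getD k 0 then
      (if k + 1 = m then true else pvInner t q n m i (j + 1) (k + 1) (id ++ [i + j]))
    else
      (if k = m then true else pvInner t q n m i (j + 1) k id)
  else false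
  termination_by n - (i + j)
  decreasing_by all_goals omega

-- termination helper for pvOuter (the Python outer loop advances i past the skip loop's result)
theorem pvSkip_ge (t : List Int) (q0 : Int) (bound i : Nat) : i ≤ pvSkip t q0 bound i := by
  fun_induction pvSkip <;> omega

-- outer loop: while i < (n - m + 1): skip; j/k scan; i += 1
def pvOuter (t q : List Int) (q0 : Int) (n m bound i : Nat) : Bool :=
  if h : i < bound then
    let i2 := pvSkip t q0 bound i
    if pvInner t q n m i2 0 0 [] = true then true
    else pvOuter t q q0 n m bound (i2 + 1)
  else false
  termination_by bound - i
  decreasing_by have := pvSkip_ge t q0 bound i; omega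

def find_similar_pattern (target_trace : List Int) (querry_trace : List Int) : Bool :=
  let querry_trace_len := querry_trace.length
  let this_trace_len := target_trace.length
  if this_trace_len < querry_trace_len then false
  else
    match PySem.List.pyGet? querry_trace 0 with
    | none => false   -- Python raises IndexError here (empty querry_trace); outside Pre_
    | some q0 =>
      if q0 ∈ target_trace then
        match PySem.List.index? target_trace q0 with
        | some i => pvOuter target_trace querry_trace q0 this_trace_len querry_trace_len
                      (this_trace_len - querry_trace_len + 1) i
        | none => false   -- unreachable: q0 ∈ target_trace
      else false

-- ===== PORT B =====
-- 'x in it' on an iterator: consume elements until x is found, return the rest (none = exhausted)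
def pvConsume (x : Int) : List Int → Option (List Int)
  | [] => none
  | t :: ts => if t = x then some ts else pvConsume x ts

-- all(x in it for x in querry_trace)
def pvAll : List Int → List Int → Bool
  | [], _ => true
  | x :: xs, it =>
    match pvConsume x it with
    | none => false
    | some rest => pvAll xs rest

def find_similar_pattern_alt (target_trace : List Int) (querry_trace : List Int) : Bool :=
  pvAll querry_trace target_trace

-- ===== PRECONDITION & SPEC =====
-- Pre_ excludes only the empty querry_trace, on which A raises IndexError (querry_trace[0]).
def Pre_find_similar_pattern (target_trace : List Int) (querry_trace : List Int) : Prop :=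
  querry_trace ≠ []
instance (target_trace : List Int) (querry_trace : List Int) : Decidable (Pre_find_similar_pattern target_trace querry_trace) := by unfold Pre_find_similar_pattern; infer_instance

def pvWitness_find_similar_pattern : List Int × List Int := ([1, 2, 3], [2, 3])

def Spec_find_similar_pattern (target_trace : List Int) (querry_trace : List Int) (out : Bool) : Prop := out = find_similar_pattern_alt target_trace querry_trace
instance (target_trace : List Int) (querry_trace : List Int) (out : Bool) : Decidable (Spec_find_similar_pattern target_trace querry_trace out) := by unfold Spec_find_similar_pattern; infer_instance

-- ===== CLAIM (what is proved, stated in full; the proofs are below) =====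
def Claim_equal_find_similar_pattern : Prop := ∀ (target_trace : List Int) (querry_trace : List Int), Dom_find_similar_pattern target_trace querry_trace → Pre_find_similar_pattern target_trace querry_trace → Spec_find_similar_pattern target_trace querry_trace (find_similar_pattern target_trace querry_trace)

-- ===== LEMMAS AND PROOFS =====

-- Both programs decide "querry_trace is a subsequence of target_trace"; each side is
-- characterised against List.Sublist and the two characterisations are chained.

theorem pvAll_iff (q t : List Int) : pvAll q t = true ↔ List.Sublist q t := by
  induction q generalizing t with
  | nil => simp [pvAll, List.nil_sublist]
  | cons x xs ih =>
    induction t with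
    | nil => simp [pvAll, pvConsume]
    | cons a ts iht =>
      by_cases hax : a = x
      · subst hax
        simp [pvAll, pvConsume, ih, List.cons_sublist_cons]
      · have hcons : pvAll (x :: xs) (a :: ts) = pvAll (x :: xs) ts := by
          simp [pvAll, pvConsume, hax]
        rw [hcons, iht, List.sublist_cons_iff]
        constructor
        · exact Or.inl
        · rintro (h | ⟨r, hr, _⟩)
          · exact h
          · exact absurd (by injection hr with h1 _; exact h1.symm) hax
      
theorem drop_succ_sublist (l : List Int) (i : Nat) :
    List.Sublist (l.drop (i + 1)) (l.drop i) := by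
  have := List.drop_sublist 1 (l.drop i)
  simpa [List.drop_drop] using this

theorem pvInner_iff (t q : List Int) (i j k : Nat) (id : List Nat) (hk : k < q.length) :
    (pvInner t q t.length q.length i j k id = true ↔
      List.Sublist (q.drop k) (t.drop (i + j))) := by
  fun_induction pvInner t q t.length q.length i j k id with
  | case1 j k id h hcmp h1 =>
    -- match, k+1 = m : returns true
    have hdq : q.drop k = q.getD k 0 :: q.drop (k + 1) := by
      rw [List.getD_eq_getElem q 0 hk]; exact List.drop_eq_getElem_cons hk
    have hdt : t.drop (i + j) = t.getD (i + j) 0 :: t.drop (i + j + 1) := by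
      rw [List.getD_eq_getElem t 0 h]; exact List.drop_eq_getElem_cons h
    have hq1 : q.drop (k + 1) = [] := List.drop_eq_nil_of_le (by omega)
    simp only [hdq, hdt, hq1, hcmp, true_iff]
    exact (List.cons_sublist_cons).mpr (List.nil_sublist _)
  | case2 j k id h hcmp h1 ih =>
    -- match, k+1 < m : recurse
    have hdq : q.drop k = q.getD k 0 :: q.drop (k + 1) := by
      rw [List.getD_eq_getElem q 0 hk]; exact List.drop_eq_getElem_cons hk
    have hdt : t.drop (i + j) = t.getD (i + j) 0 :: t.drop (i + j + 1) := by
      rw [List.getD_eq_getElem t 0 h]; exact List.drop_eq_getElem_cons h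
    rw [ih (by omega), hdq, hdt, hcmp]
    have harith : i + (j + 1) = i + j + 1 := by omega
    rw [harith, List.cons_sublist_cons]
  | case3 j id h hcmp =>
    -- k = m : impossible under hk
    omega
  | case4 j k id h hcmp h1 ih =>
    -- mismatch : recurse on j+1
    have hdq : q.drop k = q.getD k 0 :: q.drop (k + 1) := by
      rw [List.getD_eq_getElem q 0 hk]; exact List.drop_eq_getElem_cons hk
    have hdt : t.drop (i + j) = t.getD (i + j) 0 :: t.drop (i + j + 1) := by
      rw [List.getD_eq_getElem t 0 h]; exact List.drop_eq_getElem_cons h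
    rw [ih hk, hdq, hdt]
    have harith : i + (j + 1) = i + j + 1 := by omega
    rw [harith, List.sublist_cons_iff]
    constructor
    · exact Or.inl
    · rintro (hs | ⟨r, hr, _⟩)
      · exact hs
      · exact absurd (by injection hr with h1 _; exact h1.symm) hcmp
  | case5 j k id h =>
    -- i + j ≥ n : loop falls through, no full match
    have ht : t.drop (i + j) = [] := List.drop_eq_nil_of_le (by omega)
    have hq : q.drop k ≠ [] := by
      intro hq
      have := List.drop_eq_nil_iff.mp hq
      omega
    rw [ht, List.sublist_nil]
    exact iff_of_false (by simp) hq

theorem pvSkip_not_found (t : List Int) (q0 : Int) (bound i : Nat) :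
    ∀ l, i ≤ l → l < pvSkip t q0 bound i → t.getD l 0 ≠ q0 := by
  fun_induction pvSkip with
  | case1 i h ih =>
    intro l hl1 hl2
    rcases Nat.eq_or_lt_of_le hl1 with rfl | hlt
    · exact h.2
    · exact ih l hlt hl2
  | case2 i h =>
    intro l hl1 hl2
    omega

-- positions a..b-1 of t never hold q0, so any embedding of q0 :: qr may be pushed past them
theorem sublist_drop_shift (t : List Int) (q0 : Int) (qr : List Int) :
    ∀ (d a : Nat), (∀ l, a ≤ l → l < a + d → t.getD l 0 ≠ q0) →
      (List.Sublist (q0 :: qr) (t.drop a) ↔ List.Sublist (q0 :: qr) (t.drop (a + d))) := by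
  intro d
  induction d with
  | zero => intro a _; rfl
  | succ d ih =>
    intro a hno
    by_cases ha : a < t.length
    · have hdt : t.drop a = t.getD a 0 :: t.drop (a + 1) := by
        rw [List.getD_eq_getElem t 0 ha]; exact List.drop_eq_getElem_cons ha
      have hstep : List.Sublist (q0 :: qr) (t.drop a) ↔ List.Sublist (q0 :: qr) (t.drop (a + 1)) := by
        rw [hdt, List.sublist_cons_iff]
        constructor
        · rintro (hs | ⟨r, hr, _⟩)
          · exact hs
          · exact absurd (by injection hr with h1 _; exact h1.symm) (hno a le_rfl (by omega))
        · exact Or.inl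
      rw [hstep, ih (a + 1) (fun l h1 h2 => hno l (by omega) (by omega))]
      have : a + 1 + d = a + (d + 1) := by omega
      rw [this]
    · have h1 : t.drop a = [] := List.drop_eq_nil_of_le (by omega)
      have h2 : t.drop (a + (d + 1)) = [] := List.drop_eq_nil_of_le (by omega)
      rw [h1, h2]

theorem pvOuter_iff (t : List Int) (q0 : Int) (qr : List Int)
    (hmn : (q0 :: qr).length ≤ t.length) :
    ∀ i, (pvOuter t (q0 :: qr) q0 t.length (q0 :: qr).length
            (t.length - (q0 :: qr).length + 1) i = true ↔
          List.Sublist (q0 :: qr) (t.drop i)) := by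
  intro i
  fun_induction pvOuter t (q0 :: qr) q0 t.length (q0 :: qr).length
      (t.length - (q0 :: qr).length + 1) i with
  | case1 i h i2 hin =>
    -- inner scan succeeded at the skipped position
    have hi2 : i2 = pvSkip t q0 (t.length - (q0 :: qr).length + 1) i := rfl
    simp only [true_iff]
    have hsub : List.Sublist (q0 :: qr) (t.drop i2) := by
      have := (pvInner_iff t (q0 :: qr) i2 0 0 [] (by simp)).mp hin
      simpa using this
    have hge : i ≤ i2 := hi2 ▸ pvSkip_ge t q0 (t.length - (q0 :: qr).length + 1) i
    have hshift := sublist_drop_shift t q0 qr (i2 - i) i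
      (fun l h1 h2 => pvSkip_not_found t q0 (t.length - (q0 :: qr).length + 1) i l h1 (by omega))
    rw [show i + (i2 - i) = i2 by omega] at hshift
    exact hshift.mpr hsub
  | case2 i h i2 hnin ih =>
    -- inner scan failed: no embedding can start at or before the skipped position
    have hi2 : i2 = pvSkip t q0 (t.length - (q0 :: qr).length + 1) i := rfl
    have hge : i ≤ i2 := hi2 ▸ pvSkip_ge t q0 (t.length - (q0 :: qr).length + 1) i
    have hnot : ¬ List.Sublist (q0 :: qr) (t.drop i2) := by
      intro hs
      exact hnin ((pvInner_iff t (q0 :: qr) i2 0 0 [] (by simp)).mpr (by simpa using hs))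
    have hshift := sublist_drop_shift t q0 qr (i2 - i) i
      (fun l h1 h2 => pvSkip_not_found t q0 (t.length - (q0 :: qr).length + 1) i l h1 (by omega))
    rw [show i + (i2 - i) = i2 by omega] at hshift
    rw [ih]
    constructor
    · intro hs
      exact absurd (hs.trans (drop_succ_sublist t i2)) hnot
    · intro hs
      exact absurd (hshift.mp hs) hnot
  | case3 i h =>
    -- i past the outer bound: too few elements remain for a match
    refine iff_of_false (by simp) (fun hs => ?_)
    have hlen := hs.length_le
    rw [List.length_drop] at hlen
    simp only [List.length_cons] at *
    omega

theorem find_similar_pattern_A_iff (t : List Int) (q0 : Int) (qr : List Int) :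
    find_similar_pattern t (q0 :: qr) = true ↔ List.Sublist (q0 :: qr) t := by
  unfold find_similar_pattern
  simp only [PySem.List.pyGet?_zero_cons]
  by_cases hlen : t.length < (q0 :: qr).length
  · simp only [hlen, if_true]
    exact iff_of_false (by simp) (fun hs => by have := hs.length_le; omega)
  · simp only [hlen, if_false]
    by_cases hmem : q0 ∈ t
    · simp only [hmem, if_true]
      have hsome : (PySem.List.index? t q0).isSome := (PySem.List.index?_isSome_iff t q0).mpr hmem
      obtain ⟨i0, hi0⟩ := Option.isSome_iff_exists.mp hsome
      rw [hi0]
      obtain ⟨hk, hval, hbefore⟩ := PySem.List.getElem_of_index?_eq_some hi0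
      rw [pvOuter_iff t q0 qr (by omega) i0]
      have hshift := sublist_drop_shift t q0 qr i0 0
        (fun l h1 h2 => by
          rw [List.getD_eq_getElem t 0 (by omega)]
          exact hbefore l (by omega))
      simpa using hshift.symm
    · simp only [hmem, if_false]
      exact iff_of_false (by simp) (fun hs => hmem (hs.subset (List.mem_cons_self)))

-- ===== VERDICT (by name: the statement is the Claim_ definition above) =====
theorem find_similar_pattern_spec : Claim_equal_find_similar_pattern := by
  intro t q _ hpre
  unfold Spec_find_similar_pattern find_similar_pattern_alt
  match q with
  | [] => exact absurd rfl hpre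
  | q0 :: qr =>
    have hA := find_similar_pattern_A_iff t q0 qr
    have hB := pvAll_iff (q0 :: qr) t
    rw [Bool.eq_iff_iff, hA, hB]
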